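-- pv_equiv track=rewrite | github.com/yzhucn/code-health | src/providers/gitlab.py | _detect_repo_type
-- ===== SOURCE A (Python) =====
-- from typing import List, Dict, Optional
--
-- def _detect_repo_type(data: Dict) -> str:
--     """根据仓库信息检测类型"""
--     # GitLab 没有单一的 language 字段，尝试从 name 推断
--     name = data.get('name', '').lower()
--     path = data.get('path', '').lower()
--
--     if any(x in name or x in path for x in ['java', 'spring', 'backend']):
--         return 'java'
--     if any(x in name or x in path for x in ['python', 'django', 'flask']):
--         return 'python'
--     if any(x in name or x in path for x in ['vue', 'react', 'frontend', 'web']):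
--         return 'vue'
--     if any(x in name or x in path for x in ['flutter', 'mobile', 'app']):
--         return 'flutter'
--
--     return 'unknown'
-- ===== SOURCE B (Python) =====
-- _KEYWORD_RANK = {
--     'java': 0, 'spring': 0, 'backend': 0,
--     'python': 1, 'django': 1, 'flask': 1,
--     'vue': 2, 'react': 2, 'frontend': 2, 'web': 2,
--     'flutter': 3, 'mobile': 3, 'app': 3,
-- }
-- _TYPES = ['java', 'python', 'vue', 'flutter', 'unknown']
--
-- def _detect_repo_type(data):
--     name = data.get('name', '').lower()
--     path = data.get('path', '').lower()
--     best = 4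
--     for kw, rank in _KEYWORD_RANK.items():
--         if rank < best and (kw in name or kw in path):
--             best = rank
--     return _TYPES[best]
-- ===== Notes on version B (the rewrite author's own statement) =====
-- stated objective: alternative
-- what changed: Replaces A's short-circuiting chain of four grouped any-checks by a single full scan over a flat keyword-to-priority map that keeps the minimum matching rank and indexes a type array at the end.
import Mathlib
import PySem

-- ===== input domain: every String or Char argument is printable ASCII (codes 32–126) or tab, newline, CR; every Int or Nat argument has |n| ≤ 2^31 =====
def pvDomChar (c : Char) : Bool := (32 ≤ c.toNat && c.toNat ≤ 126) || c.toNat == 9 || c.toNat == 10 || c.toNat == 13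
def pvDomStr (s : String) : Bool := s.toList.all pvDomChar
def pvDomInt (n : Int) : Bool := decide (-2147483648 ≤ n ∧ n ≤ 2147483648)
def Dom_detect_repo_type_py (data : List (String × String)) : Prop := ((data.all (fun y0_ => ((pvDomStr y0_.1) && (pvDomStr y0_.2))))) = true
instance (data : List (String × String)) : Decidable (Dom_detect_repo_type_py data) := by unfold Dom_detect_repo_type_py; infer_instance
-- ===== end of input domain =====

-- B replaces A's short-circuiting chain of four grouped any-checks by a single full scan
-- over a flat keyword→priority map keeping the minimum matching rank (objective: alternative).

-- ===== PORT A =====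
def detect_repo_type_py (data : List (String × String)) : String :=
  let name := PySem.Str.lower ((PySem.Dict.mk data).getD "name" "")
  let path := PySem.Str.lower ((PySem.Dict.mk data).getD "path" "")
  if (["java", "spring", "backend"].any fun x => PySem.Str.isIn x name || PySem.Str.isIn x path) then "java"
  else if (["python", "django", "flask"].any fun x => PySem.Str.isIn x name || PySem.Str.isIn x path) then "python"
  else if (["vue", "react", "frontend", "web"].any fun x => PySem.Str.isIn x name || PySem.Str.isIn x path) then "vue"
  else if (["flutter", "mobile", "app"].any fun x => PySem.Str.isIn x name || PySem.Str.isIn x path) then "flutter"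
  else "unknown"

-- ===== PORT B =====
def pvKeywordRank : List (String × Nat) :=
  [("java", 0), ("spring", 0), ("backend", 0),
   ("python", 1), ("django", 1), ("flask", 1),
   ("vue", 2), ("react", 2), ("frontend", 2), ("web", 2),
   ("flutter", 3), ("mobile", 3), ("app", 3)]

def pvTypes : List String := ["java", "python", "vue", "flutter", "unknown"]

def detect_repo_type_py_alt (data : List (String × String)) : String :=
  let name := PySem.Str.lower ((PySem.Dict.mk data).getD "name" "")
  let path := PySem.Str.lower ((PySem.Dict.mk data).getD "path" "")
  let best := pvKeywordRank.foldl
    (fun best kr =>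
      if kr.2 < best && (PySem.Str.isIn kr.1 name || PySem.Str.isIn kr.1 path) then kr.2 else best)
    4
  -- _TYPES[best]: best is always in range (0..4), so the index never fails
  pvTypes.getD best "unknown"

-- ===== PRECONDITION & SPEC =====
def Spec_detect_repo_type_py (data : List (String × String)) (out : String) : Prop := out = detect_repo_type_py_alt data
instance (data : List (String × String)) (out : String) : Decidable (Spec_detect_repo_type_py data out) := by unfold Spec_detect_repo_type_py; infer_instance

-- ===== CLAIM (what is proved, stated in full; the proofs are below) =====
def Claim_equal_detect_repo_type_py : Prop := ∀ (data : List (String × String)), Dom_detect_repo_type_py data → Spec_detect_repo_type_py data (detect_repo_type_py data)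

-- ===== LEMMAS AND PROOFS =====

-- an accumulated minimum b is never displaced by entries of rank ≥ b
theorem pv_stay (b : Nat) (l : List (Nat × Bool)) (h : ∀ p ∈ l, b ≤ p.1) :
    l.foldl (fun best p => if p.1 < best && p.2 then p.1 else best) b = b := by
  induction l with
  | nil => rfl
  | cons a t ih =>
    have ha : ¬ a.1 < b := Nat.not_lt_of_le (h a (List.mem_cons_self ..))
    simp only [List.foldl_cons, ha, decide_false, Bool.false_and, Bool.false_eq_true, if_false]
    exact ih (fun p hp => h p (List.mem_cons_of_mem _ hp))

theorem pv_grp0 (x y z : Bool) :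
    List.foldl (fun best p => if p.1 < best && p.2 then p.1 else best) 4
        [(0,x),(0,y),(0,z)] = if x || y || z then 0 else 4 := by
  cases x <;> cases y <;> cases z <;> rfl

theorem pv_grp1 (x y z : Bool) :
    List.foldl (fun best p => if p.1 < best && p.2 then p.1 else best) 4
        [(1,x),(1,y),(1,z)] = if x || y || z then 1 else 4 := by
  cases x <;> cases y <;> cases z <;> rfl

theorem pv_grp2 (x y z w : Bool) :
    List.foldl (fun best p => if p.1 < best && p.2 then p.1 else best) 4
        [(2,x),(2,y),(2,z),(2,w)] = if x || y || z || w then 2 else 4 := by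
  cases x <;> cases y <;> cases z <;> cases w <;> rfl

theorem pv_grp3 (x y z : Bool) :
    List.foldl (fun best p => if p.1 < best && p.2 then p.1 else best) 4
        [(3,x),(3,y),(3,z)] = if x || y || z then 3 else 4 := by
  cases x <;> cases y <;> cases z <;> rfl

-- the min-rank fold over (rank, matched?) pairs = rank of the first matching group
theorem pv_fold_core (b1 b2 b3 b4 b5 b6 b7 b8 b9 b10 b11 b12 b13 : Bool) :
    ([((0:Nat),b1),(0,b2),(0,b3),(1,b4),(1,b5),(1,b6),(2,b7),(2,b8),(2,b9),(2,b10),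
      (3,b11),(3,b12),(3,b13)].foldl
        (fun best p => if p.1 < best && p.2 then p.1 else best) 4) =
    (if b1 || b2 || b3 then 0 else if b4 || b5 || b6 then 1
     else if b7 || b8 || b9 || b10 then 2 else if b11 || b12 || b13 then 3 else 4) := by
  have e : ([((0:Nat),b1),(0,b2),(0,b3),(1,b4),(1,b5),(1,b6),(2,b7),(2,b8),(2,b9),(2,b10),
      (3,b11),(3,b12),(3,b13)] : List (Nat × Bool)) =
      [(0,b1),(0,b2),(0,b3)] ++ [(1,b4),(1,b5),(1,b6)] ++ [(2,b7),(2,b8),(2,b9),(2,b10)] ++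
      [(3,b11),(3,b12),(3,b13)] := by simp
  rw [e, List.foldl_append, List.foldl_append, List.foldl_append, pv_grp0]
  by_cases h1 : (b1 || b2 || b3) = true
  · rw [if_pos h1, pv_stay 0 _ (by simp), pv_stay 0 _ (by simp), pv_stay 0 _ (by simp)]; simp [h1]
  · rw [if_neg h1, pv_grp1]
    by_cases h2 : (b4 || b5 || b6) = true
    · rw [if_pos h2, pv_stay 1 _ (by simp), pv_stay 1 _ (by simp)]; simp [h1, h2]
    · rw [if_neg h2, pv_grp2]
      by_cases h3 : (b7 || b8 || b9 || b10) = true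
      · rw [if_pos h3, pv_stay 2 _ (by simp)]; simp [h1, h2, h3]
      · rw [if_neg h3, pv_grp3]
        by_cases h4 : (b11 || b12 || b13) = true
        · rw [if_pos h4]; simp [h1, h2, h3]
        · rw [if_neg h4]; simp [h1, h2, h3]

-- indexing the type table at the first-matching-group rank gives A's chain of ifs
theorem pv_index_core (g1 g2 g3 g4 : Bool) :
    pvTypes.getD (if g1 then 0 else if g2 then 1 else if g3 then 2 else if g4 then 3 else 4)
      "unknown" =
    (if g1 then "java" else if g2 then "python" else if g3 then "vue"
     else if g4 then "flutter" else "unknown") := by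
  cases g1 <;> cases g2 <;> cases g3 <;> cases g4 <;> rfl

-- both programs agree for arbitrary lowered name/path strings
theorem pv_main (name path : String) :
    (if (["java", "spring", "backend"].any fun x => PySem.Str.isIn x name || PySem.Str.isIn x path) then "java"
     else if (["python", "django", "flask"].any fun x => PySem.Str.isIn x name || PySem.Str.isIn x path) then "python"
     else if (["vue", "react", "frontend", "web"].any fun x => PySem.Str.isIn x name || PySem.Str.isIn x path) then "vue"
     else if (["flutter", "mobile", "app"].any fun x => PySem.Str.isIn x name || PySem.Str.isIn x path) then "flutter"
     else "unknown") =
    pvTypes.getD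
      (pvKeywordRank.foldl
        (fun best kr =>
          if kr.2 < best && (PySem.Str.isIn kr.1 name || PySem.Str.isIn kr.1 path) then kr.2
          else best) 4) "unknown" := by
  have h1 :
      pvKeywordRank.foldl
        (fun best kr =>
          if kr.2 < best && (PySem.Str.isIn kr.1 name || PySem.Str.isIn kr.1 path) then kr.2
          else best) 4 =
      (pvKeywordRank.map
        (fun kr => (kr.2, PySem.Str.isIn kr.1 name || PySem.Str.isIn kr.1 path))).foldl
        (fun best p => if p.1 < best && p.2 then p.1 else best) 4 := by
    simp only [List.foldl_map]
  rw [h1]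
  simp only [pvKeywordRank, List.map_cons, List.map_nil]
  rw [pv_fold_core, pv_index_core]
  simp [List.any_cons, List.any_nil, Bool.or_assoc]

-- ===== VERDICT (by name: the statement is the Claim_ definition above) =====
theorem detect_repo_type_py_spec : Claim_equal_detect_repo_type_py := by
  intro data _
  unfold Spec_detect_repo_type_py detect_repo_type_py detect_repo_type_py_alt
  exact pv_main _ _
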